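-- pv_equiv track=rewrite | github.com/suyingze/net-detection | net_detect.py | get_batch_neighbors
-- ===== SOURCE A (Python) =====
-- def get_batch_neighbors(neighbor_map, batch_idx, batch_size):
--     """获取批次的邻域信息"""
--     batch_neighbors = {}
--     start_idx = batch_idx * batch_size
--
--     for i in range(batch_size):
--         global_idx = start_idx + i
--         if global_idx in neighbor_map:
--             # 将全局索引转换为批次内索引
--             batch_neighbors[i] = {idx - start_idx for idx in neighbor_map[global_idx] if start_idx <= idx < start_idx + batch_size}
--
--     return batch_neighbors
-- ===== SOURCE B (Python) =====
-- def get_batch_neighbors(neighbor_map, batch_idx, batch_size):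
--     """获取批次的邻域信息"""
--     start = batch_idx * batch_size
--     stop = start + batch_size
--     hits = [(k - start, {j - start for j in v if start <= j < stop})
--             for k, v in neighbor_map.items() if start <= k < stop]
--     hits.sort(key=lambda kv: kv[0])
--     return dict(hits)
-- ===== Notes on version B (the rewrite author's own statement) =====
-- stated objective: alternative
-- what changed: Instead of scanning the whole dense range(batch_size) and probing the dict for each index, B iterates once over the map's items, keeps the in-range entries with a range guard, sorts them by batch-local key and builds the result dict from that list; cost depends on len(neighbor_map) rather than batch_size.
import Mathlib
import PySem

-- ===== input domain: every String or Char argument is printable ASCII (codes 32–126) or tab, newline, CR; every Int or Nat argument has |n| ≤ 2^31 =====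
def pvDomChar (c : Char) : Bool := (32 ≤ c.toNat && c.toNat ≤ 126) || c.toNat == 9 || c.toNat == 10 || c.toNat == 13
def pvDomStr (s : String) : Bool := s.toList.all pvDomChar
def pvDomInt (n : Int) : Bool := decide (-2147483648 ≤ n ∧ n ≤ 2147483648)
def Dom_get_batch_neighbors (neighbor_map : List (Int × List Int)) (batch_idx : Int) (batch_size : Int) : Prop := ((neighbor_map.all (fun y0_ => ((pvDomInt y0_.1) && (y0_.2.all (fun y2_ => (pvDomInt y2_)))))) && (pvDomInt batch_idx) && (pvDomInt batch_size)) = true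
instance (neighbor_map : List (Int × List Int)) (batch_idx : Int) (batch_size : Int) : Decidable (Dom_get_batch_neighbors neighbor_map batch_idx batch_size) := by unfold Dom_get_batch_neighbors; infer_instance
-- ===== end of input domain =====

-- B replaces A's dense scan over range(batch_size) by one pass over the map's items
-- filtered with a range guard, then sorted by batch-local key (objective: alternative
-- decomposition whose traversal follows the map, not the index range).


-- ===== PORT A =====
def get_batch_neighbors (neighbor_map : List (Int × List Int)) (batch_idx : Int) (batch_size : Int) : List (Int × List Int) :=
  let d : PySem.Dict Int (List Int) := PySem.Dict.mk neighbor_map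
  let start_idx := batch_idx * batch_size
  let batch_neighbors : PySem.Dict Int (List Int) :=
    (PySem.List.pyRange 0 batch_size 1).foldl (fun bn i =>
      let global_idx := start_idx + i
      if d.contains global_idx then
        bn.insert i (PySem.Set.ofList
          (((d.getD global_idx []).filter
              (fun idx => decide (start_idx ≤ idx ∧ idx < start_idx + batch_size))).map
            (fun idx => idx - start_idx)))
      else bn) PySem.Dict.empty
  batch_neighbors.items

-- ===== PORT B =====
def get_batch_neighbors_alt (neighbor_map : List (Int × List Int)) (batch_idx : Int) (batch_size : Int) : List (Int × List Int) :=
  let start := batch_idx * batch_size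
  let stop := start + batch_size
  let hits : List (Int × List Int) :=
    (neighbor_map.filter (fun kv => decide (start ≤ kv.1 ∧ kv.1 < stop))).map
      (fun kv => (kv.1 - start, PySem.Set.ofList
        ((kv.2.filter (fun j => decide (start ≤ j ∧ j < stop))).map (fun j => j - start))))
  let hits' := PySem.List.sorted hits (fun kv => kv.1) false
  (hits'.foldl (fun d kv => d.insert kv.1 kv.2) (PySem.Dict.empty : PySem.Dict Int (List Int))).items

-- ===== PRECONDITION & SPEC =====
-- Pre_ states the dict-representation invariant only: the association list stands for a
-- Python dict, whose keys are necessarily distinct; no actual Python input is excluded.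
def Pre_get_batch_neighbors (neighbor_map : List (Int × List Int)) (batch_idx : Int) (batch_size : Int) : Prop :=
  (neighbor_map.map Prod.fst).Nodup
instance (neighbor_map : List (Int × List Int)) (batch_idx : Int) (batch_size : Int) : Decidable (Pre_get_batch_neighbors neighbor_map batch_idx batch_size) := by unfold Pre_get_batch_neighbors; infer_instance
def pvWitness_get_batch_neighbors : (List (Int × List Int)) × Int × Int := ([(0, [0, 1]), (1, [5])], 0, 2)

def Spec_get_batch_neighbors (neighbor_map : List (Int × List Int)) (batch_idx : Int) (batch_size : Int) (out : List (Int × List Int)) : Prop := out = get_batch_neighbors_alt neighbor_map batch_idx batch_size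
instance (neighbor_map : List (Int × List Int)) (batch_idx : Int) (batch_size : Int) (out : List (Int × List Int)) : Decidable (Spec_get_batch_neighbors neighbor_map batch_idx batch_size out) := by unfold Spec_get_batch_neighbors; infer_instance

-- ===== CLAIM (what is proved, stated in full; the proofs are below) =====
def Claim_equal_get_batch_neighbors : Prop := ∀ (neighbor_map : List (Int × List Int)) (batch_idx : Int) (batch_size : Int), Dom_get_batch_neighbors neighbor_map batch_idx batch_size → Pre_get_batch_neighbors neighbor_map batch_idx batch_size → Spec_get_batch_neighbors neighbor_map batch_idx batch_size (get_batch_neighbors neighbor_map batch_idx batch_size)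

-- ===== LEMMAS AND PROOFS =====
-- helper: the common value transform
def pvF (start bs : Int) (v : List Int) : List Int :=
  PySem.Set.ofList ((v.filter (fun j => decide (start ≤ j ∧ j < start + bs))).map (fun j => j - start))

-- helper: the canonical result list both ports are proved equal to
def pvC (nm : List (Int × List Int)) (start bs : Int) : List (Int × List Int) :=
  ((PySem.List.pyRange 0 bs 1).filter (fun i => (PySem.Dict.mk nm).contains (start + i))).map
    (fun i => (i, pvF start bs ((PySem.Dict.mk nm).getD (start + i) [])))

theorem pvC_pairwise (nm : List (Int × List Int)) (start bs : Int) :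
    (pvC nm start bs).Pairwise (fun a b => a.1 < b.1) := by
  unfold pvC
  refine List.Pairwise.map _ (fun a b h => h) ?_
  exact (PySem.List.pairwise_lt_pyRange_one 0 bs).filter _

theorem pvA_eq_pvC (nm : List (Int × List Int)) (bi bs : Int) :
    get_batch_neighbors nm bi bs = pvC nm (bi * bs) bs := by
  unfold get_batch_neighbors
  dsimp only
  rw [PySem.List.foldl_if_eq_foldl_filter]
  rw [PySem.Dict.items_foldl_insert_fresh
      ((PySem.List.pyRange 0 bs 1).filter (fun i => (PySem.Dict.mk nm).contains (bi * bs + i)))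
      (k := fun i => i)
      (v := fun i => PySem.Set.ofList
        (List.map (fun idx => idx - bi * bs)
          (List.filter (fun idx => decide (bi * bs ≤ idx ∧ idx < bi * bs + bs))
            ((PySem.Dict.mk nm).getD (bi * bs + i) []))))
      PySem.Dict.empty
      (by intro a _; simp [PySem.Dict.contains_empty])
      (by simpa using ((PySem.List.nodup_pyRange_one 0 bs).filter _))]
  simp [pvC, pvF, PySem.Dict.empty]

theorem pv_keys_nodup (nm : List (Int × List Int)) (hnd : (nm.map Prod.fst).Nodup) :
    (PySem.Dict.mk nm).keys.Nodup := by
  simpa [PySem.Dict.keys] using hnd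

theorem mem_pvC_iff (nm : List (Int × List Int)) (start bs : Int)
    (hnd : (nm.map Prod.fst).Nodup) (a : Int × List Int) :
    a ∈ pvC nm start bs ↔
      ∃ kv ∈ nm, (start ≤ kv.1 ∧ kv.1 < start + bs) ∧ a = (kv.1 - start, pvF start bs kv.2) := by
  unfold pvC
  constructor
  · intro ha
    simp only [List.mem_map, List.mem_filter] at ha
    obtain ⟨i, ⟨hir, hc⟩, rfl⟩ := ha
    rw [PySem.List.mem_pyRange_one] at hir
    have hk : ((PySem.Dict.mk nm).get? (start + i)).isSome := by
      rw [← PySem.Dict.contains_eq_isSome_get?]; exact hc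
    obtain ⟨v, hv⟩ := Option.isSome_iff_exists.mp hk
    have hmem : (start + i, v) ∈ nm := PySem.Dict.mem_items_of_get?_eq_some _ hv
    have hgd : (PySem.Dict.mk nm).getD (start + i) [] = v :=
      PySem.Dict.getD_of_get?_eq_some _ [] hv
    refine ⟨(start + i, v), hmem, ⟨by omega, by omega⟩, ?_⟩
    have h1 : start + i - start = i := by ring
    simp [hgd, h1]
  · rintro ⟨⟨k, v⟩, hmem, ⟨h1, h2⟩, rfl⟩
    have hk2 : start + (k - start) = k := by ring
    refine List.mem_map.mpr ⟨k - start, List.mem_filter.mpr ⟨?_, ?_⟩, ?_⟩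
    · rw [PySem.List.mem_pyRange_one]; omega
    · rw [hk2, PySem.Dict.contains_iff_mem_keys]
      simp only [PySem.Dict.keys]
      exact List.mem_map.mpr ⟨(k, v), hmem, rfl⟩
    · rw [hk2, PySem.Dict.getD_of_mem_items (PySem.Dict.mk nm) hmem (pv_keys_nodup nm hnd) []]

theorem pvB_eq_pvC (nm : List (Int × List Int)) (bi bs : Int)
    (hnd : (nm.map Prod.fst).Nodup) :
    get_batch_neighbors_alt nm bi bs = pvC nm (bi * bs) bs := by
  unfold get_batch_neighbors_alt
  dsimp only
  have hg : (fun kv : Int × List Int => (kv.1 - bi * bs, PySem.Set.ofList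
        ((kv.2.filter (fun j => decide (bi * bs ≤ j ∧ j < bi * bs + bs))).map
          (fun j => j - bi * bs)))) =
      fun kv : Int × List Int => (kv.1 - bi * bs, pvF (bi * bs) bs kv.2) := rfl
  rw [hg]
  have hC_pair := pvC_pairwise nm (bi * bs) bs
  have hC_nodup : (pvC nm (bi * bs) bs).Nodup :=
    List.Pairwise.imp (fun h => ne_of_apply_ne Prod.fst (ne_of_lt h)) hC_pair
  have hhits1 : (((nm.filter (fun kv => decide (bi * bs ≤ kv.1 ∧ kv.1 < bi * bs + bs))).map
      (fun kv : Int × List Int => (kv.1 - bi * bs, pvF (bi * bs) bs kv.2))).map Prod.fst).Nodup := by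
    rw [List.map_map]
    have : (Prod.fst ∘ fun kv : Int × List Int => (kv.1 - bi * bs, pvF (bi * bs) bs kv.2)) =
        (fun x : Int => x - bi * bs) ∘ Prod.fst := rfl
    rw [this, ← List.map_map]
    refine List.Nodup.map (fun a b h => by omega) ?_
    exact hnd.sublist (List.filter_sublist.map Prod.fst)
  have hhits_nodup := hhits1.of_map
  have hsorted : PySem.List.sorted
      ((nm.filter (fun kv => decide (bi * bs ≤ kv.1 ∧ kv.1 < bi * bs + bs))).map
        (fun kv : Int × List Int => (kv.1 - bi * bs, pvF (bi * bs) bs kv.2)))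
      (fun kv => kv.1) false = pvC nm (bi * bs) bs := by
    refine PySem.List.sorted_eq_of_perm_of_pairwise_lt _ _ _ ?_ hC_pair
    refine (List.perm_ext_iff_of_nodup hC_nodup hhits_nodup).mpr ?_
    intro a
    rw [mem_pvC_iff nm (bi * bs) bs hnd a]
    simp only [List.mem_map, List.mem_filter, decide_eq_true_eq]
    constructor
    · rintro ⟨kv, hmem, hq, rfl⟩; exact ⟨kv, ⟨hmem, hq⟩, rfl⟩
    · rintro ⟨kv, ⟨hmem, hq⟩, rfl⟩; exact ⟨kv, hmem, hq, rfl⟩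
  rw [hsorted]
  rw [PySem.Dict.items_foldl_insert_fresh (pvC nm (bi * bs) bs)
      (k := fun kv : Int × List Int => kv.1) (v := fun kv : Int × List Int => kv.2)
      PySem.Dict.empty
      (by intro a _; simp [PySem.Dict.contains_empty])
      (by
        refine List.Pairwise.imp (fun h => ne_of_lt h) ?_
        exact List.pairwise_map.mpr hC_pair)]
  simp [PySem.Dict.empty]

-- ===== VERDICT (by name: the statement is the Claim_ definition above) =====
theorem get_batch_neighbors_spec : Claim_equal_get_batch_neighbors := by
  intro nm bi bs _ hpre
  unfold Spec_get_batch_neighbors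
  rw [pvA_eq_pvC, pvB_eq_pvC nm bi bs hpre]
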